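-- pv_equiv track=rewrite | github.com/KrishnaMurali177/Algorithms-for-Data-Guided-Business-Intelligence | Market Segmentation/sac1.py | cluster_convert
-- ===== SOURCE A (Python) =====
-- def cluster_convert(list):
--     mapping = {}
--     converted_comm_list = []
--     count = 0
--     original_cluster_mapping = {}
--     for i in range(len(list)):
--         v = list[i]
--         if v in mapping:
--             converted_comm_list.append(mapping[v])
--             original_cluster_mapping[mapping[v]].append(i)
--         else:
--             mapping[v] = count
--             converted_comm_list.append(count)
--             original_cluster_mapping[count] = [i]
--             count += 1
--     return converted_comm_list, original_cluster_mapping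
-- ===== SOURCE B (Python) =====
-- def cluster_convert(list):
--     # Peel distinct values off the front: each round takes the first remaining
--     # value, records it, and drops all its occurrences; no mapping dict at all.
--     fs = []
--     rest = list
--     while rest:
--         v = rest[0]
--         fs.append(v)
--         rest = [x for x in rest if x != v]
--     converted_comm_list = [fs.index(v) for v in list]
--     original_cluster_mapping = {c: [i for i, x in enumerate(list) if x == w]
--                                 for c, w in enumerate(fs)}
--     return converted_comm_list, original_cluster_mapping
-- ===== Notes on version B (the rewrite author's own statement) =====
-- stated objective: alternative
-- what changed: Replaces A's single pass that maintains a value-to-label dict, a running count and the groups dict in one interleaved loop by a peeling strategy with no mapping dict at all: repeatedly take the first remaining value and filter out all its occurrences to get the distinct values in first-seen order, then relabel by list position lookup (fs.index) and build each label's index group by scanning the input once per distinct value.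
import Mathlib
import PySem

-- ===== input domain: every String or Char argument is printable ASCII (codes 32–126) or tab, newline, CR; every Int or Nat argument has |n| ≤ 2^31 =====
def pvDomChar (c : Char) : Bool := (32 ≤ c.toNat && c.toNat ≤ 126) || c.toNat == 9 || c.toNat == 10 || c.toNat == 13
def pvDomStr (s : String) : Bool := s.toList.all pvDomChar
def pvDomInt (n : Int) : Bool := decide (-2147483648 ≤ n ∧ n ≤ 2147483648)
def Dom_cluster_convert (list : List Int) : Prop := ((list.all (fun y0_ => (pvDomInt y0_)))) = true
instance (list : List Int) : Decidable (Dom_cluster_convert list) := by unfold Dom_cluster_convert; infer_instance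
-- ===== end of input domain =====

-- B replaces A's single interleaved dict-building loop by peeling distinct values off the front (no mapping dict), then index lookups and per-value grouping; alternative decomposition, not faster.


-- ===== PORT A =====
-- A's loop body: state (mapping, converted_comm_list, count, original_cluster_mapping), input (i, v)
def stepA (st : PySem.Dict Int Int × List Int × Int × PySem.Dict Int (List Int))
    (iv : Int × Int) : PySem.Dict Int Int × List Int × Int × PySem.Dict Int (List Int) :=
  match st.1.get? iv.2 with
  | some m => (st.1, st.2.1 ++ [m], st.2.2.1, st.2.2.2.modify m [] (fun l => l ++ [iv.1]))
  | none => (st.1.insert iv.2 st.2.2.1, st.2.1 ++ [st.2.2.1], st.2.2.1 + 1,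
      st.2.2.2.insert st.2.2.1 [iv.1])

def cluster_convert (list : List Int) : List Int × (List (Int × List Int)) :=
  let st := (PySem.List.pyRange 0 (PySem.List.len list) 1).foldl
    (fun st i => stepA st (i, PySem.List.pyGetD list i 0))
    (PySem.Dict.empty, ([], 0, PySem.Dict.empty))
  (st.2.1, st.2.2.2.items)

-- ===== PORT B =====
-- the while loop 'while rest: v = rest[0]; fs.append(v); rest = [x for x in rest if x != v]'
-- as the structural recursion on the shrinking 'rest'
def peelB (vs : List Int) : List Int :=
  match vs with
  | [] => []
  | v :: t => v :: peelB ((v :: t).filter (fun x => decide (x ≠ v)))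
termination_by vs.length
decreasing_by
  rw [List.filter_cons, if_neg (by simp)]
  have := List.length_filter_le (fun x => decide (x ≠ v)) t
  simp only [List.length_cons]
  omega

def cluster_convert_alt (list : List Int) : List Int × (List (Int × List Int)) :=
  let fs := peelB list
  -- fs.index(v): every v of list is in fs, so index? is always some and the 0 default is never used
  let converted_comm_list := list.map (fun v => (((PySem.List.index? fs v).getD 0 : Nat) : Int))
  -- dict comprehension over enumerate(fs): the keys c are pairwise distinct, so the dict is this association list
  let original_cluster_mapping := (PySem.List.enumerate fs).map
    (fun cw => (cw.1, ((PySem.List.enumerate list).filter (fun p => p.2 == cw.2)).map (fun p => p.1)))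
  (converted_comm_list, original_cluster_mapping)

-- ===== PRECONDITION & SPEC =====
def Spec_cluster_convert (list : List Int) (out : List Int × (List (Int × List Int))) : Prop := out = cluster_convert_alt list
instance (list : List Int) (out : List Int × (List (Int × List Int))) : Decidable (Spec_cluster_convert list out) := by unfold Spec_cluster_convert; infer_instance

-- ===== CLAIM (what is proved, stated in full; the proofs are below) =====
def Claim_equal_cluster_convert : Prop := ∀ (list : List Int), Dom_cluster_convert list → Spec_cluster_convert list (cluster_convert list)

-- ===== LEMMAS AND PROOFS =====

-- proof-side helpers: the three phases A's interleaved loop is equivalent to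
def mapB (m : PySem.Dict Int Int) (v : Int) : PySem.Dict Int Int :=
  if m.contains v then m else m.insert v (m.size : Int)

def groupB (d : PySem.Dict Int (List Int)) (ic : Int × Int) : PySem.Dict Int (List Int) :=
  d.modify ic.2 [] (fun l => l ++ [ic.1])

-- membership in the phase-1 mapping is membership in the processed list
lemma contains_foldl_mapB (xs : List Int) (m : PySem.Dict Int Int) (v : Int) :
    (xs.foldl mapB m).contains v = (m.contains v || decide (v ∈ xs)) := by
  induction xs generalizing m with
  | nil => simp
  | cons x xs ih =>
    simp only [List.foldl_cons, ih, mapB]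
    by_cases hx : m.contains x = true
    · simp [hx]
      by_cases hvx : v = x
      · subst hvx; simp [hx]
      · simp [hvx]
    · rw [if_neg hx]
      rw [PySem.Dict.contains_insert]
      by_cases hvx : v = x
      · subst hvx; simp
      · rw [show (v == x) = false from by simp [hvx]]
        simp [List.mem_cons, hvx]

-- the invariant carried by A's single loop, phrased against the three phases
lemma invA (xs : List Int) :
    (PySem.List.enumerate xs 0).foldl stepA (PySem.Dict.empty, ([], 0, PySem.Dict.empty)) =
      (xs.foldl mapB PySem.Dict.empty,
       (xs.map (fun v => (xs.foldl mapB PySem.Dict.empty).getD v 0),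
        ((xs.foldl mapB PySem.Dict.empty).size : Int),
        (PySem.List.enumerate
            (xs.map (fun v => (xs.foldl mapB PySem.Dict.empty).getD v 0))).foldl
          groupB PySem.Dict.empty)) ∧
    (∀ v c, (xs.foldl mapB PySem.Dict.empty).get? v = some c →
        c < ((xs.foldl mapB PySem.Dict.empty).size : Int)) ∧
    (∀ c, ((PySem.List.enumerate
            (xs.map (fun v => (xs.foldl mapB PySem.Dict.empty).getD v 0))).foldl
          groupB PySem.Dict.empty).contains c = true →
        c < ((xs.foldl mapB PySem.Dict.empty).size : Int)) := by
  induction xs using List.reverseRecOn with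
  | nil =>
    refine ⟨rfl, ?_, ?_⟩
    · intro v c h; simp [PySem.Dict.get?_empty] at h
    · intro c h; simp [PySem.Dict.contains_empty] at h
  | append_singleton xs x ih =>
    obtain ⟨hst, hI1, hI2⟩ := ih
    set m := xs.foldl mapB PySem.Dict.empty with hm
    set C := xs.map (fun v => m.getD v 0) with hC
    set G := (PySem.List.enumerate C).foldl groupB PySem.Dict.empty with hG
    have hfold : (xs ++ [x]).foldl mapB PySem.Dict.empty = mapB m x := by
      rw [List.foldl_append]; rfl
    have henum : PySem.List.enumerate (xs ++ [x]) 0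
        = PySem.List.enumerate xs 0 ++ [((xs.length : Int), x)] := by
      rw [PySem.List.enumerate_append]
      simp [PySem.List.enumerate]
    rw [henum, List.foldl_append, hst]
    by_cases hc : m.contains x = true
    · -- x already seen: mapping and count unchanged
      obtain ⟨c, hgc⟩ : ∃ c, m.get? x = some c := by
        rw [PySem.Dict.contains_eq_isSome_get?] at hc
        exact Option.isSome_iff_exists.mp hc
      have hm' : (xs ++ [x]).foldl mapB PySem.Dict.empty = m := by
        rw [hfold]; simp [mapB, hc]
      have hmapx : m.getD x 0 = c := PySem.Dict.getD_of_get?_eq_some m 0 hgc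
      have hC' : (xs ++ [x]).map (fun v => m.getD v 0) = C ++ [c] := by
        simp [hC, hmapx]
      have henumC : PySem.List.enumerate (C ++ [c])
          = PySem.List.enumerate C ++ [((xs.length : Int), c)] := by
        rw [PySem.List.enumerate_append]
        simp [PySem.List.enumerate, hC]
      refine ⟨?_, ?_, ?_⟩
      · rw [hm', hC', henumC, List.foldl_append, ← hG]
        simp [stepA, hgc, groupB]
      · rw [hm']; exact hI1
      · rw [hm', hC', henumC, List.foldl_append, ← hG]
        intro c' h
        simp only [groupB, List.foldl_cons, List.foldl_nil,
          PySem.Dict.contains_modify] at h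
        rcases Bool.or_eq_true_iff.mp h with h1 | h1
        · have : c' = c := by simpa using h1
          subst this; exact hI1 x c' hgc
        · exact hI2 c' h1
    · -- x unseen: new label (m.size)
      have hcf : m.contains x = false := by simpa using hc
      have hgx : m.get? x = none := by
        have h2 := PySem.Dict.contains_eq_isSome_get? m x
        rw [hcf] at h2
        cases hgo : m.get? x with
        | none => rfl
        | some w => rw [hgo] at h2; simp at h2
      have hxs : x ∉ xs := by
        have h := contains_foldl_mapB xs PySem.Dict.empty x
        rw [← hm, PySem.Dict.contains_empty] at h
        simp only [Bool.false_or] at h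
        intro hmem
        exact hc (by rw [h]; simpa using hmem)
      have hm' : (xs ++ [x]).foldl mapB PySem.Dict.empty
          = m.insert x (m.size : Int) := by
        rw [hfold]; simp [mapB, hc]
      have hC' : (xs ++ [x]).map (fun v => (m.insert x (m.size : Int)).getD v 0)
          = C ++ [(m.size : Int)] := by
        rw [List.map_append]
        congr 1
        · refine List.map_congr_left ?_
          intro v hv
          exact PySem.Dict.getD_insert_of_ne m _ _ (by rintro rfl; exact hxs hv)
        · simp [PySem.Dict.getD_insert_self]
      have hsize : ((m.insert x (m.size : Int)).size : Int) = (m.size : Int) + 1 := by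
        rw [PySem.Dict.size_insert]
        simp [hc]
      have hGn : G.contains (m.size : Int) = false := by
        rw [Bool.eq_false_iff]
        intro h
        exact absurd (hI2 _ h) (by simp)
      have henumC : PySem.List.enumerate (C ++ [(m.size : Int)])
          = PySem.List.enumerate C ++ [((xs.length : Int), (m.size : Int))] := by
        rw [PySem.List.enumerate_append]
        simp [PySem.List.enumerate, hC]
      have hGstep : (PySem.List.enumerate (C ++ [(m.size : Int)])).foldl
            groupB PySem.Dict.empty
          = G.insert (m.size : Int) [(xs.length : Int)] := by
        rw [henumC, List.foldl_append, ← hG]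
        simp only [List.foldl_cons, List.foldl_nil, groupB, PySem.Dict.modify]
        rw [PySem.Dict.getD_of_not_contains G _ hGn]
        simp
      refine ⟨?_, ?_, ?_⟩
      · rw [hm', hC', hGstep, hsize]
        simp [stepA, hgx]
      · rw [hm', hsize]
        intro v c h
        by_cases hvx : v = x
        · subst hvx
          rw [PySem.Dict.get?_insert_self] at h
          simp at h
          omega
        · rw [PySem.Dict.get?_insert_of_ne m _ hvx] at h
          have := hI1 v c h
          omega
      · rw [hm', hC', hGstep, hsize]
        intro c h
        rw [PySem.Dict.contains_insert] at h
        rcases Bool.or_eq_true_iff.mp h with h1 | h1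
        · have : c = (m.size : Int) := by simpa using h1
          omega
        · have := hI2 c h1
          omega

-- structural equation of peelB
lemma peelB_cons (v : Int) (t : List Int) :
    peelB (v :: t) = v :: peelB (t.filter (fun x => decide (x ≠ v))) := by
  have h1 : peelB (v :: t) = v :: peelB ((v :: t).filter (fun x => decide (x ≠ v))) := by
    rw [peelB.eq_def]
  rw [h1, List.filter_cons, if_neg (by simp)]

lemma mem_peelB (vs : List Int) (w : Int) : w ∈ peelB vs ↔ w ∈ vs := by
  fun_induction peelB vs with
  | case1 => simp
  | case2 v t ih =>
    have hfc : (v :: t).filter (fun x => decide (x ≠ v)) = t.filter (fun x => decide (x ≠ v)) := by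
      rw [List.filter_cons, if_neg (by simp)]
    rw [hfc] at ih ⊢
    simp only [List.mem_cons, ih, List.mem_filter, decide_eq_true_eq]
    by_cases hwv : w = v <;> simp [hwv]

lemma nodup_peelB (vs : List Int) : (peelB vs).Nodup := by
  fun_induction peelB vs with
  | case1 => simp
  | case2 v t ih =>
    have hfc : (v :: t).filter (fun x => decide (x ≠ v)) = t.filter (fun x => decide (x ≠ v)) := by
      rw [List.filter_cons, if_neg (by simp)]
    rw [hfc] at ih ⊢
    refine List.nodup_cons.mpr ⟨?_, ih⟩
    intro hmem
    have := (mem_peelB _ v).mp hmem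
    simp at this

-- phase-1 fold skips values already in the dict
lemma foldl_mapB_filter (v : Int) (t : List Int) (d : PySem.Dict Int Int)
    (hv : d.contains v = true) :
    t.foldl mapB d = (t.filter (fun x => decide (x ≠ v))).foldl mapB d := by
  induction t generalizing d with
  | nil => rfl
  | cons x t ih =>
    by_cases hxv : x = v
    · subst hxv
      simp only [List.filter_cons, decide_not]
      have : mapB d x = d := by simp [mapB, hv]
      simp [this, ih d hv]
    · have hv' : (mapB d x).contains v = true := by
        unfold mapB
        split
        · exact hv
        · rw [PySem.Dict.contains_insert, hv]; simp
      simp [hxv, ih (mapB d x) hv']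

-- the phase-1 mapping looks values up at their position in the peeled distinct list
lemma get?_foldl_mapB_nil (d : PySem.Dict Int Int) (w : Int) :
    (([] : List Int).foldl mapB d).get? w =
      if d.contains w then d.get? w
      else (PySem.List.index? (peelB []) w).map (fun j => ((j : Nat) : Int) + (d.size : Int)) := by
  by_cases hdw : d.contains w = true
  · rw [if_pos hdw]; rfl
  · rw [if_neg hdw, List.foldl_nil,
      (PySem.Dict.get?_eq_none_iff_contains d w).mpr (by simpa using hdw)]
    have hp : peelB ([] : List Int) = [] := by rw [peelB.eq_def]
    rw [hp, (PySem.List.index?_eq_none_iff _ _).mpr (by simp)]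
    rfl

-- the phase-1 mapping looks values up at their position in the peeled distinct list
lemma get?_foldl_mapB (n : Nat) : ∀ (vs : List Int), vs.length ≤ n →
    ∀ (d : PySem.Dict Int Int) (w : Int), (∀ x ∈ vs, d.contains x = false) →
    (vs.foldl mapB d).get? w =
      if d.contains w then d.get? w
      else (PySem.List.index? (peelB vs) w).map (fun j => ((j : Nat) : Int) + (d.size : Int)) := by
  induction n with
  | zero =>
    intro vs hlen d w _
    have : vs = [] := List.eq_nil_of_length_eq_zero (Nat.le_zero.mp hlen)
    subst this
    exact get?_foldl_mapB_nil d w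
  | succ n ih =>
    intro vs hlen d w hfresh
    match vs with
    | [] => exact get?_foldl_mapB_nil d w
    | v :: t =>
      have hvc : d.contains v = false := hfresh v (List.mem_cons_self)
      have hstep : mapB d v = d.insert v (d.size : Int) := by simp [mapB, hvc]
      have hcont : (d.insert v (d.size : Int)).contains v = true := by
        rw [PySem.Dict.contains_insert]; simp
      have hsz : ((d.insert v (d.size : Int)).size : Int) = (d.size : Int) + 1 := by
        rw [PySem.Dict.size_insert]; simp [hvc]
      rw [List.foldl_cons, hstep, foldl_mapB_filter v t _ hcont]
      have hlen' : (t.filter (fun x => decide (x ≠ v))).length ≤ n := by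
        have := List.length_filter_le (fun x => decide (x ≠ v)) t
        simp only [List.length_cons] at hlen
        omega
      have hfresh' : ∀ x ∈ t.filter (fun x => decide (x ≠ v)),
          (d.insert v (d.size : Int)).contains x = false := by
        intro x hx
        simp only [List.mem_filter, decide_eq_true_eq] at hx
        rw [PySem.Dict.contains_insert]
        have := hfresh x (List.mem_cons_of_mem v hx.1)
        simp [this, hx.2]
      rw [ih _ hlen' _ w hfresh', peelB_cons]
      by_cases hwv : w = v
      · subst hwv
        rw [if_pos hcont, if_neg (by simp [hvc]), PySem.Dict.get?_insert_self,
          PySem.List.index?_cons_self]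
        simp
      · have hcw : (d.insert v (d.size : Int)).contains w = d.contains w := by
          rw [PySem.Dict.contains_insert]
          simp [hwv]
        rw [hcw]
        by_cases hdw : d.contains w = true
        · rw [if_pos hdw, if_pos hdw, PySem.Dict.get?_insert_of_ne d _ hwv]
        · rw [if_neg hdw, if_neg hdw,
            PySem.List.index?_cons_of_ne _ (fun h => hwv h.symm), hsz]
          cases PySem.List.index? (peelB (t.filter (fun x => decide (x ≠ v)))) w with
          | none => rfl
          | some j =>
            simp only [Option.map_some]
            congr 1
            push_cast
            ring

-- ofList commutes with filter
lemma ofList_filter (p : Int → Bool) (l : List Int) :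
    PySem.Set.ofList (l.filter p) = (PySem.Set.ofList l).filter p := by
  induction l using List.reverseRecOn with
  | nil => rfl
  | append_singleton l x ih =>
    rw [List.filter_append, PySem.Set.ofList_append_singleton]
    by_cases hp : p x = true
    · rw [List.filter_cons, if_pos hp, List.filter_nil, PySem.Set.ofList_append_singleton, ih]
      by_cases hx : x ∈ PySem.Set.ofList l
      · rw [PySem.Set.add_of_mem hx,
          PySem.Set.add_of_mem (List.mem_filter.mpr ⟨hx, hp⟩)]
      · rw [PySem.Set.add_of_not_mem hx,
          PySem.Set.add_of_not_mem (fun h => hx (List.mem_of_mem_filter h)),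
          List.filter_append, List.filter_cons, if_pos hp, List.filter_nil]
    · rw [List.filter_cons, if_neg hp, List.filter_nil, List.append_nil, ih]
      by_cases hx : x ∈ PySem.Set.ofList l
      · rw [PySem.Set.add_of_mem hx]
      · rw [PySem.Set.add_of_not_mem hx, List.filter_append, List.filter_cons,
          if_neg hp, List.filter_nil, List.append_nil]

-- peeling computes set(xs) in first-seen order
lemma peelB_eq_ofList (vs : List Int) : peelB vs = PySem.Set.ofList vs := by
  fun_induction peelB vs with
  | case1 => rfl
  | case2 v t ih =>
    have hfc : (v :: t).filter (fun x => decide (x ≠ v)) = t.filter (fun x => decide (x ≠ v)) := by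
      rw [List.filter_cons, if_neg (by simp)]
    rw [hfc] at ih ⊢
    rw [PySem.Set.ofList_cons, ih, ofList_filter, PySem.Set.discard]
    congr 1
    exact List.filter_congr (fun y _ => by by_cases h : y = v <;> simp [h])

-- ofList commutes with an injective-on-the-list map
lemma ofList_map_inj (f : Int → Int) (l : List Int)
    (hinj : ∀ a ∈ l, ∀ b ∈ l, f a = f b → a = b) :
    PySem.Set.ofList (l.map f) = (PySem.Set.ofList l).map f := by
  induction l using List.reverseRecOn with
  | nil => rfl
  | append_singleton l x ih =>
    have hinj' : ∀ a ∈ l, ∀ b ∈ l, f a = f b → a = b := fun a ha b hb =>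
      hinj a (List.mem_append_left _ ha) b (List.mem_append_left _ hb)
    rw [List.map_append, List.map_cons, List.map_nil, PySem.Set.ofList_append_singleton,
      PySem.Set.ofList_append_singleton, ih hinj']
    by_cases hx : x ∈ l
    · rw [PySem.Set.add_of_mem (List.mem_map_of_mem ((PySem.Set.mem_ofList _ _).mpr hx)),
        PySem.Set.add_of_mem ((PySem.Set.mem_ofList _ _).mpr hx)]
    · have h2 : x ∉ PySem.Set.ofList l := fun h => hx ((PySem.Set.mem_ofList _ _).mp h)
      have h1 : f x ∉ (PySem.Set.ofList l).map f := by
        intro h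
        obtain ⟨b, hb, hfb⟩ := List.mem_map.mp h
        have hbl := (PySem.Set.mem_ofList _ _).mp hb
        have hxb : x = b := hinj x (List.mem_append_right _ (List.mem_singleton.mpr rfl)) b
          (List.mem_append_left _ hbl) hfb.symm
        exact hx (hxb ▸ hbl)
      rw [PySem.Set.add_of_not_mem h1, PySem.Set.add_of_not_mem h2, List.map_append]
      rfl

-- index? at a member of a Nodup list is its position
lemma index?_getElem_of_nodup (l : List Int) (hnd : l.Nodup) (j : Nat) (hj : j < l.length) :
    PySem.List.index? l l[j] = some j := by
  rw [PySem.List.index?_eq_some_iff]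
  refine ⟨l.take j, l.drop (j + 1), ?_, by simp [Nat.min_eq_left (Nat.le_of_lt hj)], ?_⟩
  · conv_lhs => rw [← List.take_append_drop j l]
    congr 1
    rw [List.drop_eq_getElem_cons hj]
  · intro hmem
    obtain ⟨i, hi, hEq⟩ := List.getElem_of_mem hmem
    have hij : i < j ∧ i < l.length := by
      rw [List.length_take] at hi
      omega
    rw [List.getElem_take] at hEq
    exact absurd ((List.Nodup.getElem_inj_iff hnd).mp hEq) (by omega)

-- enumerate commutes with map on the values
lemma enumerate_map (f : Int → Int) (xs : List Int) (s : Int) :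
    PySem.List.enumerate (xs.map f) s = (PySem.List.enumerate xs s).map (fun p => (p.1, f p.2)) := by
  induction xs generalizing s with
  | nil => simp [PySem.List.enumerate_nil]
  | cons x xs ih => simp [PySem.List.enumerate_cons, ih]

-- the phase-1 mapping's getD is the position in the peeled distinct list
lemma lab_getD (xs : List Int) (v : Int) (hv : v ∈ xs) :
    (xs.foldl mapB PySem.Dict.empty).getD v 0
      = (((PySem.List.index? (peelB xs) v).getD 0 : Nat) : Int) := by
  have hg := get?_foldl_mapB xs.length xs le_rfl PySem.Dict.empty v
    (fun x _ => by simp [PySem.Dict.contains_empty])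
  rw [if_neg (by simp [PySem.Dict.contains_empty])] at hg
  obtain ⟨j, hj⟩ := Option.isSome_iff_exists.mp
    ((PySem.List.index?_isSome_iff _ _).mpr ((mem_peelB xs v).mpr hv))
  rw [hj] at hg
  simp only [Option.map_some] at hg
  rw [PySem.Dict.getD_of_get?_eq_some _ 0 hg, hj]
  simp [PySem.Dict.size_empty]

-- the position-in-fs labelling is injective on xs
lemma lab_inj (xs : List Int) : ∀ a ∈ xs, ∀ b ∈ xs,
    (((PySem.List.index? (peelB xs) a).getD 0 : Nat) : Int)
      = (((PySem.List.index? (peelB xs) b).getD 0 : Nat) : Int) → a = b := by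
  intro a ha b hb h
  obtain ⟨ja, hja⟩ := Option.isSome_iff_exists.mp
    ((PySem.List.index?_isSome_iff _ _).mpr ((mem_peelB xs a).mpr ha))
  obtain ⟨jb, hjb⟩ := Option.isSome_iff_exists.mp
    ((PySem.List.index?_isSome_iff _ _).mpr ((mem_peelB xs b).mpr hb))
  obtain ⟨hka, hfa, -⟩ := PySem.List.getElem_of_index?_eq_some hja
  obtain ⟨hkb, hfb, -⟩ := PySem.List.getElem_of_index?_eq_some hjb
  rw [hja, hjb] at h
  simp only [Option.getD_some, Int.natCast_inj] at h
  subst h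
  rw [← hfa, ← hfb]

lemma lab_getElem (xs : List Int) (j : Nat) (hj : j < (peelB xs).length) :
    (((PySem.List.index? (peelB xs) (peelB xs)[j]).getD 0 : Nat) : Int) = (j : Int) := by
  rw [index?_getElem_of_nodup _ (nodup_peelB xs) j hj]
  simp

-- the grouping fold's items list is the per-distinct-value comprehension
lemma items_foldl_groupB (xs : List Int) :
    ((PySem.List.enumerate (xs.map (fun v =>
        (((PySem.List.index? (peelB xs) v).getD 0 : Nat) : Int)))).foldl
        groupB PySem.Dict.empty).items
    = (PySem.List.enumerate (peelB xs)).map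
        (fun cw => (cw.1, ((PySem.List.enumerate xs).filter
            (fun p => p.2 == cw.2)).map (fun p => p.1))) := by
  set lab := fun v : Int => (((PySem.List.index? (peelB xs) v).getD 0 : Nat) : Int) with hlab
  set P := PySem.List.enumerate (xs.map lab) with hP
  set G := P.foldl groupB PySem.Dict.empty with hGdef
  have hunfold : G = P.foldl
      (fun d (x : Int × Int) => d.modify x.2 [] (fun l => l ++ [x.1])) PySem.Dict.empty := rfl
  have hkeys : G.keys = PySem.Set.ofList (xs.map lab) := by
    rw [hunfold, PySem.Dict.keys_foldl_modify_key P (fun x : Int × Int => x.2) []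
      (fun _ x => fun l => l ++ [x.1]) PySem.Dict.empty,
      PySem.Dict.keys_empty, PySem.Set.update_nil_left, hP, PySem.List.map_snd_enumerate]
  have hnd : G.keys.Nodup := by rw [hkeys]; exact PySem.Set.nodup_ofList _
  have hgd : ∀ c, G.getD c [] = (P.filter (fun p => p.2 == c)).map (fun p => p.1) := by
    intro c
    have hswap : G = (P.map Prod.swap).foldl
        (fun d (p : Int × Int) => d.modify p.1 [] (fun l => l ++ [p.2])) PySem.Dict.empty := by
      rw [List.foldl_map]
      rfl
    rw [hswap, PySem.Dict.getD_foldl_modify_append, PySem.Dict.getD_empty,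
      List.filter_map, List.map_map, List.nil_append]
    rfl
  rw [PySem.Dict.items_eq_map_keys G hnd [], hkeys]
  have hofl : PySem.Set.ofList (xs.map lab) = (peelB xs).map lab := by
    rw [ofList_map_inj lab xs (lab_inj xs), peelB_eq_ofList]
  rw [hofl, List.map_map]
  apply List.ext_getElem
  · simp [PySem.List.length_enumerate]
  · intro j h1 h2
    have hjfs : j < (peelB xs).length := by simpa using h1
    rw [List.getElem_map, List.getElem_map, Function.comp_apply,
      PySem.List.getElem_enumerate]
    have hlj : lab (peelB xs)[j] = (j : Int) := lab_getElem xs j hjfs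
    rw [hlj]
    refine Prod.ext (by simp) ?_
    rw [hgd]
    have hPm : P = (PySem.List.enumerate xs).map (fun p => (p.1, lab p.2)) :=
      enumerate_map lab xs 0
    rw [hPm, List.filter_map, List.map_map]
    have hcong : ∀ p ∈ PySem.List.enumerate xs,
        (((fun p : Int × Int => p.2 == (j : Int)) ∘ (fun p : Int × Int => (p.1, lab p.2))) p)
          = ((fun p : Int × Int => p.2 == (peelB xs)[j]) p) := by
      intro p hp
      obtain ⟨k, hk, rfl⟩ := (PySem.List.mem_enumerate_iff _ _ _).mp hp
      simp only [Function.comp_apply]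
      by_cases hx : xs[k] = (peelB xs)[j]
      · simp [hx, hlj]
      · have hne : lab xs[k] ≠ (j : Int) := by
          intro hEq
          obtain ⟨m, hm⟩ := Option.isSome_iff_exists.mp
            ((PySem.List.index?_isSome_iff _ _).mpr
              ((mem_peelB xs xs[k]).mpr (List.getElem_mem hk)))
          obtain ⟨hkm, hfm, -⟩ := PySem.List.getElem_of_index?_eq_some hm
          rw [hlab] at hEq
          simp only [hm, Option.getD_some, Int.natCast_inj] at hEq
          subst hEq
          exact hx hfm.symm
        simp [hne, hx]
    rw [List.filter_congr hcong]
    simp [Function.comp_def]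

-- ===== VERDICT (by name: the statement is the Claim_ definition above) =====
theorem cluster_convert_spec : Claim_equal_cluster_convert := by
  intro xs _
  unfold Spec_cluster_convert cluster_convert cluster_convert_alt
  have h := (invA xs).1
  rw [PySem.List.enumerate_eq_map_pyRange xs 0, List.foldl_map] at h
  simp only [h]
  have hC : xs.map (fun v => (xs.foldl mapB PySem.Dict.empty).getD v 0)
      = xs.map (fun v => (((PySem.List.index? (peelB xs) v).getD 0 : Nat) : Int)) :=
    List.map_congr_left (fun v hv => lab_getD xs v hv)
  rw [hC, items_foldl_groupB xs]
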